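-- pv_equiv track=rewrite | github.com/maikka39/Google-Foobar | 2.2.py | solution
-- ===== SOURCE A (Python) =====
-- def solution(s):
--     to_salute = 0
--     counter = 0  # Should have been a counter
--     for i, ch in enumerate(s):
--         if ch == "-":
--             continue
--         if ch == ">":
--             counter += 1
--         else:
--             to_salute += counter
--     return to_salute*2
-- ===== SOURCE B (Python) =====
-- def solution(s):
--     total = 0
--     for i, ch in enumerate(s):
--         if ch != '-' and ch != '>':
--             total += sum(1 for c in s[:i] if c == '>')
--     return total * 2
-- ===== Notes on version B (the rewrite author's own statement) =====
-- stated objective: alternative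
-- what changed: Replaces A's single-pass running counter of right-movers with an explicit per-left-mover re-scan: for each character that is a left-mover (neither a wall nor a right-mover), B counts the right-mover characters in the prefix before it and sums those counts.
import Mathlib
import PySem

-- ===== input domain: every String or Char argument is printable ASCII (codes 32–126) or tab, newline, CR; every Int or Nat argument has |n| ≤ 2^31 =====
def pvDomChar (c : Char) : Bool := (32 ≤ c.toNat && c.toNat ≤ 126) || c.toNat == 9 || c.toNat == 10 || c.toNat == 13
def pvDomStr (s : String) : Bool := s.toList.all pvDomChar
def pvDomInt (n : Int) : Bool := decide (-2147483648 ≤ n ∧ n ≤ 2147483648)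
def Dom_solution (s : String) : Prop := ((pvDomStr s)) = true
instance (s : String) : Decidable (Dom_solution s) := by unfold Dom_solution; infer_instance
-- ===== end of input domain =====

-- B replaces A's single-pass running counter by an explicit per-left-mover re-scan of the
-- prefix ('alternative' decomposition; not faster).

-- ===== PORT A =====
-- A: one pass with a running counter of '>' seen so far; each non-'-' non-'>' char adds the counter.
def solution (s : String) : Int :=
  let r := (PySem.List.enumerate s.toList).foldl
    (fun (st : Int × Int) p =>
      if p.2 = '-' then st
      else if p.2 = '>' then (st.1, st.2 + 1)
      else (st.1 + st.2, st.2)) (0, 0)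
  r.1 * 2

-- ===== PORT B =====
-- B: for each left-mover at index i, count the '>' characters in the slice s[:i] and sum.
def solution_alt (s : String) : Int :=
  let l := s.toList
  ((PySem.List.enumerate l).foldl
    (fun (total : Int) p =>
      if p.2 ≠ '-' ∧ p.2 ≠ '>' then
        total + ((PySem.List.slice l none (some p.1)).foldl
          (fun (acc : Int) c => if c = '>' then acc + 1 else acc) 0)
      else total) 0) * 2

-- ===== PRECONDITION & SPEC =====
def Spec_solution (s : String) (out : Int) : Prop := out = solution_alt s
instance (s : String) (out : Int) : Decidable (Spec_solution s out) := by unfold Spec_solution; infer_instance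

-- ===== CLAIM (what is proved, stated in full; the proofs are below) =====
def Claim_equal_solution : Prop := ∀ (s : String), Dom_solution s → Spec_solution s (solution s)

-- ===== LEMMAS AND PROOFS =====

def pvStepA (st : Int × Int) (p : Int × Char) : Int × Int :=
  if p.2 = '-' then st
  else if p.2 = '>' then (st.1, st.2 + 1)
  else (st.1 + st.2, st.2)

def pvStepB (l : List Char) (total : Int) (p : Int × Char) : Int :=
  if p.2 ≠ '-' ∧ p.2 ≠ '>' then
    total + (PySem.List.slice l none (some p.1)).foldl
      (fun (acc : Int) c => if c = '>' then acc + 1 else acc) 0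
  else total

theorem pvCount_eq (l : List Char) :
    l.foldl (fun (acc : Int) c => if c = '>' then acc + 1 else acc) 0
      = (l.countP (· = '>') : Int) := by
  have := PySem.List.foldl_ite_add_one (l := l) (p := fun c => c = '>') (a := (0:Int))
  simpa using this

-- Main invariant: B's fold over a suffix (slicing the full list at the running index)
-- equals the first component of A's fold with the counter initialised to the
-- '>'-count of the prefix already consumed.
theorem pvMain (l pre suf : List Char) (hl : l = pre ++ suf) (t : Int) :
    (PySem.List.enumerate suf (pre.length : Int)).foldl (pvStepB l) t =
    ((PySem.List.enumerate suf (pre.length : Int)).foldl pvStepA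
      (t, (pre.countP (· = '>') : Int))).1 := by
  induction suf generalizing pre t with
  | nil => simp [PySem.List.enumerate_nil]
  | cons x xs ih =>
      rw [PySem.List.enumerate_cons, List.foldl_cons, List.foldl_cons]
      have hslice : PySem.List.slice l none (some (pre.length : Int)) = pre := by
        rw [PySem.List.slice_to_natCast]; simp [hl]
      have hpre' : l = (pre ++ [x]) ++ xs := by simp [hl]
      have hlen : ((pre ++ [x]).length : Int) = (pre.length : Int) + 1 := by simp
      by_cases hd : x = '-'
      · rw [show pvStepB l t ((pre.length : Int), x) = t from by simp [pvStepB, hd],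
            show pvStepA (t, (pre.countP (· = '>') : Int)) ((pre.length : Int), x)
              = (t, (pre.countP (· = '>') : Int)) from by simp [pvStepA, hd]]
        have := ih (pre := pre ++ [x]) hpre' (t := t)
        rw [hlen] at this
        simpa [List.countP_append, hd] using this
      · by_cases hg : x = '>'
        · rw [show pvStepB l t ((pre.length : Int), x) = t from by simp [pvStepB, hg],
              show pvStepA (t, (pre.countP (· = '>') : Int)) ((pre.length : Int), x)
                = (t, (pre.countP (· = '>') : Int) + 1) from by simp [pvStepA, hg]]
          have := ih (pre := pre ++ [x]) hpre' (t := t)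
          rw [hlen] at this
          simpa [List.countP_append, hg] using this
        · rw [show pvStepB l t ((pre.length : Int), x)
                = t + (pre.countP (· = '>') : Int) from by
                  simp [pvStepB, hd, hg, hslice, pvCount_eq],
              show pvStepA (t, (pre.countP (· = '>') : Int)) ((pre.length : Int), x)
                = (t + (pre.countP (· = '>') : Int), (pre.countP (· = '>') : Int)) from by
                  simp [pvStepA, hd, hg]]
          have := ih (pre := pre ++ [x]) hpre' (t := t + (pre.countP (· = '>') : Int))
          rw [hlen] at this
          simpa [List.countP_append, hg] using this

-- ===== VERDICT (by name: the statement is the Claim_ definition above) =====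
theorem solution_spec : Claim_equal_solution := by
  intro s _
  unfold Spec_solution solution solution_alt
  have h := pvMain s.toList [] s.toList (by simp) 0
  simp only [List.length_nil, Nat.cast_zero, List.countP_nil] at h
  show ((PySem.List.enumerate s.toList 0).foldl pvStepA (0, 0)).1 * 2 =
    ((PySem.List.enumerate s.toList 0).foldl (pvStepB s.toList) 0) * 2
  rw [h]
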